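-- pv_equiv track=rewrite | github.com/shefferger/linkShortener | iterator60.py | goNext
-- ===== SOURCE A (Python) =====
-- arr = ['0', '1', '2', '3', '4', '5',
--        '6', '7', '8', '9', 'a', 'b',
--        'c', 'd', 'e', 'f', 'g', 'h',
--        'i', 'j', 'k', 'l', 'm', 'n',
--        'o', 'p', 'q', 'r', 's', 't',
--        'w', 'v', 'x', 'y', 'z', 'A',
--        'B', 'C', 'D', 'E', 'F', 'G',
--        'H', 'I', 'J', 'K', 'L', 'M',
--        'N', 'O', 'P', 'Q', 'R', 'S',
--        'T', 'W', 'V', 'X', 'Y', 'Z']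
--
-- def goNext(word):
--     for i in range(len(word) - 1, -1, -1):
--         word = word[:i] + addOne(word[i]) + word[i + 1:]
--         if word[i] != '0':
--             break
--         if i == 0 and word[0] == '0':
--             word = '1' + word
--             break
--     return word
--
-- def addOne(key):
--     x = arr.index(key)
--     if x < len(arr) - 1:
--         x += 1
--     else:
--         x = 0
--     key = arr[x]
--     return key
-- ===== SOURCE B (Python) =====
-- arr = ['0', '1', '2', '3', '4', '5',
--        '6', '7', '8', '9', 'a', 'b',
--        'c', 'd', 'e', 'f', 'g', 'h',
--        'i', 'j', 'k', 'l', 'm', 'n',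
--        'o', 'p', 'q', 'r', 's', 't',
--        'w', 'v', 'x', 'y', 'z', 'A',
--        'B', 'C', 'D', 'E', 'F', 'G',
--        'H', 'I', 'J', 'K', 'L', 'M',
--        'N', 'O', 'P', 'Q', 'R', 'S',
--        'T', 'W', 'V', 'X', 'Y', 'Z']
--
-- def addOne(key):
--     return arr[(arr.index(key) + 1) % len(arr)]
--
-- def goNext(word):
--     if word == '':
--         return ''
--     last = addOne(word[-1])
--     if last != '0':
--         return word[:-1] + last
--     if word[:-1] == '':
--         return '1' + last
--     return goNext(word[:-1]) + last
-- ===== Notes on version B (the rewrite author's own statement) =====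
-- stated objective: simpler
-- what changed: A's backward index loop that splices the whole string (word[:i] + addOne(word[i]) + word[i+1:]) on every carry step is replaced by a direct recursion on the prefix word[:-1]: increment the last digit, and only on a wrap ('0') recurse into the prefix (or prepend '1' when the prefix is empty).
import Mathlib
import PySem

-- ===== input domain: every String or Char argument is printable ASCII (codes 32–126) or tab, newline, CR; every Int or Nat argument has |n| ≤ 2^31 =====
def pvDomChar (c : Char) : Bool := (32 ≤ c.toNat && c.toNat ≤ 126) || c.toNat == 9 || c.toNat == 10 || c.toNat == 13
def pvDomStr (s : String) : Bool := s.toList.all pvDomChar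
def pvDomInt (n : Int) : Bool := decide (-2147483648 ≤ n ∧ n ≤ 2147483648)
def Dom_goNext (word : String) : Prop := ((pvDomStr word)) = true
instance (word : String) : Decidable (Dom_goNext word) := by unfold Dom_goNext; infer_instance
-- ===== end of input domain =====

-- B replaces A's backward index loop that rebuilds the whole string each step by a recursion
-- on the prefix word[:-1] (simpler decomposition; same behaviour, incl. raising on bad digits).

-- the module-level digit alphabet `arr`
def pvArr : List Char :=
  ['0', '1', '2', '3', '4', '5', '6', '7', '8', '9', 'a', 'b',
   'c', 'd', 'e', 'f', 'g', 'h', 'i', 'j', 'k', 'l', 'm', 'n',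
   'o', 'p', 'q', 'r', 's', 't', 'w', 'v', 'x', 'y', 'z', 'A',
   'B', 'C', 'D', 'E', 'F', 'G', 'H', 'I', 'J', 'K', 'L', 'M',
   'N', 'O', 'P', 'Q', 'R', 'S', 'T', 'W', 'V', 'X', 'Y', 'Z']

-- ===== PORT A =====
-- A's addOne: `x = arr.index(key)` (ValueError = none); `x+1` if below the last slot else 0; `arr[x]`
def addOneA (key : Char) : Option Char :=
  match PySem.List.index? pvArr key with
  | none => none
  | some x =>
      let x : Int := if (x : Int) < (pvArr.length : Int) - 1 then (x : Int) + 1 else 0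
      PySem.List.pyGet? pvArr x

-- A's loop `for i in range(len(word)-1, -1, -1)` as the obvious countdown recursion on i;
-- none = the ValueError raised by addOne
def goNextA : List Char → Nat → Option (List Char)
  | word, i =>
    match PySem.List.pyGet? word (i : Int) with          -- word[i]
    | none => none
    | some ci =>
      match addOneA ci with
      | none => none
      | some c =>
        -- word = word[:i] + addOne(word[i]) + word[i+1:]
        let w := PySem.List.slice word none (some (i : Int)) ++ [c] ++
                 PySem.List.slice word (some ((i : Int) + 1)) none
        match PySem.List.pyGet? w (i : Int) with         -- word[i]
        | none => none
        | some wi =>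
          if wi ≠ '0' then some w                        -- break
          else if i = 0 ∧ PySem.List.pyGet? w 0 = some '0' then some ('1' :: w)   -- '1' + word; break
          else
            match i with
            | 0 => some w                                -- range exhausted
            | Nat.succ j => goNextA w j

def goNext (word : String) : String :=
  match word.toList with
  | [] => word                                           -- empty range: the loop body never runs
  | _ :: _ =>
    match goNextA word.toList (word.toList.length - 1) with
    | some r => String.ofList r
    | none => word                                       -- unreachable under Pre_ (Python raises)

-- ===== PORT B =====
-- B's addOne: arr[(arr.index(key) + 1) % len(arr)]
def addOneB (key : Char) : Option Char :=
  match PySem.List.index? pvArr key with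
  | none => none
  | some x => PySem.List.pyGet? pvArr (PySem.Int.mod ((x : Int) + 1) (pvArr.length : Int))

-- B's recursion on the prefix; word[:-1] is dropLast (PySem.List.slice_to_neg_one), word[-1] is pyGet? · (-1)
def goNextB : List Char → Option (List Char)
  | [] => some []
  | c :: cs =>
    match PySem.List.pyGet? (c :: cs) (-1) with
    | none => none
    | some lastc =>
      match addOneB lastc with
      | none => none
      | some last =>
        if last ≠ '0' then some ((c :: cs).dropLast ++ [last])
        else if (c :: cs).dropLast = [] then some ('1' :: [last])
        else (goNextB ((c :: cs).dropLast)).map (· ++ [last])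
  termination_by l => l.length
  decreasing_by simp

def goNext_alt (word : String) : String :=
  match goNextB word.toList with
  | some r => String.ofList r
  | none => word

-- ===== PRECONDITION & SPEC =====
-- Pre_ excludes exactly the inputs on which A raises ValueError: the first character from the
-- right that is not 'Z' (the digit the carry scan stops at) must belong to arr.
def Pre_goNext (word : String) : Prop :=
  ((word.toList.reverse.dropWhile (· == 'Z')).headD 'Z') ∈ pvArr
instance (word : String) : Decidable (Pre_goNext word) := by unfold Pre_goNext; infer_instance

def pvWitness_goNext : String := "aZ"

def Spec_goNext (word : String) (out : String) : Prop := out = goNext_alt word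
instance (word : String) (out : String) : Decidable (Spec_goNext word out) := by unfold Spec_goNext; infer_instance

-- ===== CLAIM (what is proved, stated in full; the proofs are below) =====
def Claim_equal_goNext : Prop := ∀ (word : String), Dom_goNext word → Pre_goNext word → Spec_goNext word (goNext word)

-- ===== LEMMAS AND PROOFS =====

theorem addOne_eq_mem : ∀ c ∈ pvArr, addOneA c = addOneB c := by
  intro c hc; fin_cases hc <;> decide

theorem addOneA_good : ∀ c ∈ pvArr, c ≠ 'Z' → (addOneA c).isSome ∧ addOneA c ≠ some '0' := by
  intro c hc; fin_cases hc <;> decide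

theorem addOne_eq (c : Char) : addOneA c = addOneB c := by
  by_cases h : c ∈ pvArr
  · exact addOne_eq_mem c h
  · unfold addOneA addOneB
    rw [(PySem.List.index?_eq_none_iff pvArr c).mpr h]

theorem addOneA_Z : addOneA 'Z' = some '0' := by decide

-- B's recursion on p ++ [c], unfolded
theorem goNextB_append (p : List Char) (c : Char) :
    goNextB (p ++ [c]) =
      match addOneB c with
      | none => none
      | some last =>
        if last ≠ '0' then some (p ++ [last])
        else if p = [] then some ('1' :: [last])
        else (goNextB p).map (· ++ [last]) := by
  cases p with
  | nil =>
    rw [List.nil_append]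
    conv_lhs => rw [goNextB]
    simp [PySem.List.pyGet?_neg_one]
  | cons a as =>
    rw [List.cons_append]
    conv_lhs => rw [goNextB]
    have h1 : PySem.List.pyGet? (a :: (as ++ [c])) (-1) = some c := by
      rw [← List.cons_append]; exact PySem.List.pyGet?_neg_one_append_singleton (a :: as) c
    have h2 : (a :: (as ++ [c])).dropLast = a :: as := by
      rw [← List.cons_append]; exact List.dropLast_concat
    rw [h1, h2]

-- the untouched prefix of A's loop carries an already-updated suffix along unchanged
theorem goNextA_append (s : List Char) :
    ∀ (i : Nat) (p : List Char), i < p.length →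
      goNextA (p ++ s) i = (goNextA p i).map (· ++ s) := by
  intro i
  induction i with
  | zero =>
    intro p hp
    conv_lhs => rw [goNextA]
    conv_rhs => rw [goNextA]
    have e1 : PySem.List.pyGet? (p ++ s) ((0:Nat) : Int) = some p[0] := by
      rw [PySem.List.pyGet?_natCast, List.getElem?_append_left hp, List.getElem?_eq_getElem hp]
    have e2 : PySem.List.pyGet? p ((0:Nat) : Int) = some p[0] := by
      rw [PySem.List.pyGet?_natCast, List.getElem?_eq_getElem hp]
    rw [e1, e2]; dsimp only
    cases h : addOneA p[0] with
    | none => rfl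
    | some c =>
      dsimp only
      have etake : PySem.List.slice (p ++ s) none (some ((0:Nat) : Int)) = p.take 0 := by
        rw [PySem.List.slice_to_natCast]; exact List.take_append_of_le_length (le_of_lt hp)
      have edrop : PySem.List.slice (p ++ s) (some (((0:Nat) : Int) + 1)) none = p.drop 1 ++ s := by
        rw [show (((0:Nat):Int)+1) = ((1 : Nat):Int) by push_cast, PySem.List.slice_from_natCast]
        exact List.drop_append_of_le_length hp
      have etake' : PySem.List.slice p none (some ((0:Nat) : Int)) = p.take 0 :=
        PySem.List.slice_to_natCast p 0
      have edrop' : PySem.List.slice p (some (((0:Nat) : Int) + 1)) none = p.drop 1 := by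
        rw [show (((0:Nat):Int)+1) = ((1 : Nat):Int) by push_cast, PySem.List.slice_from_natCast]
      rw [etake, edrop, etake', edrop']
      simp [List.take_zero, List.nil_append]
      by_cases hc : c = '0' <;> simp [hc]
  | succ j ih =>
    intro p hp
    conv_lhs => rw [goNextA]
    conv_rhs => rw [goNextA]
    have e1 : PySem.List.pyGet? (p ++ s) ((j+1 : Nat) : Int) = some p[j+1] := by
      rw [PySem.List.pyGet?_natCast, List.getElem?_append_left hp, List.getElem?_eq_getElem hp]
    have e2 : PySem.List.pyGet? p ((j+1 : Nat) : Int) = some p[j+1] := by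
      rw [PySem.List.pyGet?_natCast, List.getElem?_eq_getElem hp]
    rw [e1, e2]; dsimp only
    cases h : addOneA p[j+1] with
    | none => rfl
    | some c =>
      dsimp only
      have etake : PySem.List.slice (p ++ s) none (some ((j+1:Nat) : Int)) = p.take (j+1) := by
        rw [PySem.List.slice_to_natCast]; exact List.take_append_of_le_length (le_of_lt hp)
      have edrop : PySem.List.slice (p ++ s) (some (((j+1:Nat) : Int) + 1)) none = p.drop (j+2) ++ s := by
        rw [show (((j+1:Nat):Int)+1) = ((j+2 : Nat):Int) by push_cast; ring, PySem.List.slice_from_natCast]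
        exact List.drop_append_of_le_length hp
      have etake' : PySem.List.slice p none (some ((j+1:Nat) : Int)) = p.take (j+1) :=
        PySem.List.slice_to_natCast p (j+1)
      have edrop' : PySem.List.slice p (some (((j+1:Nat) : Int) + 1)) none = p.drop (j+2) := by
        rw [show (((j+1:Nat):Int)+1) = ((j+2 : Nat):Int) by push_cast; ring, PySem.List.slice_from_natCast]
      rw [etake, edrop, etake', edrop']
      have hlen_take : (p.take (j+1)).length = j+1 := by simp; omega
      have eg1 : PySem.List.pyGet? (p.take (j+1) ++ [c] ++ (p.drop (j+2) ++ s)) ((j+1:Nat) : Int) = some c := by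
        rw [show p.take (j+1) ++ [c] ++ (p.drop (j+2) ++ s) = p.take (j+1) ++ c :: (p.drop (j+2) ++ s) by simp,
            show ((j+1:Nat) : Int) = ((p.take (j+1)).length : Int) by rw [hlen_take]]
        exact PySem.List.pyGet?_append_length _ _ _
      have eg2 : PySem.List.pyGet? (p.take (j+1) ++ [c] ++ p.drop (j+2)) ((j+1:Nat) : Int) = some c := by
        rw [show p.take (j+1) ++ [c] ++ p.drop (j+2) = p.take (j+1) ++ c :: p.drop (j+2) by simp,
            show ((j+1:Nat) : Int) = ((p.take (j+1)).length : Int) by rw [hlen_take]]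
        exact PySem.List.pyGet?_append_length _ _ _
      rw [eg1, eg2]; dsimp only
      by_cases hc : c = '0'
      · subst hc
        simp only [ne_eq, not_true_eq_false, if_false, Nat.succ_ne_zero, false_and]
        have hrec := ih (p.take (j+1) ++ ['0'] ++ p.drop (j+2)) (by simp [hlen_take]; omega)
        rw [show p.take (j+1) ++ ['0'] ++ (p.drop (j+2) ++ s) = (p.take (j+1) ++ ['0'] ++ p.drop (j+2)) ++ s by simp]
        simpa using hrec
      · simp [hc]

-- Pre_goNext, read on the character list
def PreL (l : List Char) : Prop := ((l.reverse.dropWhile (· == 'Z')).headD 'Z') ∈ pvArr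

theorem mainL (l : List Char) : PreL l → l ≠ [] →
    goNextA l (l.length - 1) = goNextB l := by
  induction l using List.reverseRecOn with
  | nil => intro _ h; exact absurd rfl h
  | append_singleton p c ih =>
    intro hpre _
    have hlen : (p ++ [c]).length - 1 = p.length := by simp
    rw [hlen, goNextB_append]
    conv_lhs => rw [goNextA]
    have e1 : PySem.List.pyGet? (p ++ [c]) ((p.length : Nat) : Int) = some c :=
      PySem.List.pyGet?_append_length p [] c
    rw [e1]; dsimp only
    have etake : PySem.List.slice (p ++ [c]) none (some ((p.length:Nat) : Int)) = p := by
      rw [PySem.List.slice_to_natCast, List.take_append_of_le_length le_rfl, List.take_length]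
    have edrop : PySem.List.slice (p ++ [c]) (some (((p.length:Nat) : Int) + 1)) none = [] := by
      rw [show (((p.length:Nat):Int)+1) = ((p.length+1 : Nat):Int) by push_cast; ring,
          PySem.List.slice_from_natCast,
          show p.length + 1 = (p ++ [c]).length by simp, List.drop_length]
    by_cases hz : c = 'Z'
    · subst hz
      rw [addOneA_Z, ← addOne_eq, addOneA_Z]; dsimp only
      rw [etake, edrop, List.append_nil]
      have eg : PySem.List.pyGet? (p ++ ['0']) ((p.length:Nat) : Int) = some '0' :=
        PySem.List.pyGet?_append_length p [] '0'
      rw [eg]; dsimp only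
      cases p with
      | nil => simp
      | cons a as =>
        have hcond : ¬((a :: as).length = 0 ∧
            PySem.List.pyGet? ((a :: as) ++ ['0']) 0 = some '0') := by simp
        rw [if_neg (by decide : ¬('0' ≠ '0')), if_neg hcond]
        have hp' : PreL (a :: as) := by
          simp only [PreL, List.reverse_append] at hpre ⊢
          simpa [List.dropWhile] using hpre
        simp only [List.length_cons]
        have happ := goNextA_append ['0'] as.length (a :: as) (by simp)
        have hih := ih hp' (List.cons_ne_nil a as)
        simp only [List.length_cons, Nat.add_sub_cancel] at hih
        rw [happ, hih, if_neg (List.cons_ne_nil a as), if_neg (by decide : ¬('0' ≠ '0'))]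
    · have hc : c ∈ pvArr := by
        simp only [PreL, List.reverse_append] at hpre
        simpa [List.dropWhile, hz] using hpre
      obtain ⟨hsome, hnz⟩ := addOneA_good c hc hz
      obtain ⟨c', hc'⟩ := Option.isSome_iff_exists.mp hsome
      have hne : c' ≠ '0' := by intro h; exact hnz (h ▸ hc')
      rw [hc', ← addOne_eq, hc']; dsimp only
      rw [etake, edrop, List.append_nil]
      have eg : PySem.List.pyGet? (p ++ [c']) ((p.length:Nat) : Int) = some c' :=
        PySem.List.pyGet?_append_length p [] c'
      rw [eg]; dsimp only
      rw [if_pos hne, if_pos hne]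

theorem goNext_eq_alt (word : String) (hpre : Pre_goNext word) : goNext word = goNext_alt word := by
  unfold goNext goNext_alt
  have hpre' : PreL word.toList := hpre
  cases hl : word.toList with
  | nil =>
    have hw : word = String.ofList [] := by rw [← @String.ofList_toList word, hl]
    rw [goNextB]
    exact hw
  | cons a as =>
    rw [hl] at hpre'
    rw [mainL (a :: as) hpre' (List.cons_ne_nil a as)]

-- ===== VERDICT (by name: the statement is the Claim_ definition above) =====
theorem goNext_spec : Claim_equal_goNext := by
  intro word _ hpre
  exact goNext_eq_alt word hpre
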